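-- pv_equiv track=rewrite | github.com/Soumyadeepaul/Code_Workout | Find the lone set bit.py | findSetBit
-- ===== SOURCE A (Python) =====
-- def findSetBit(N):
--     # Write your code here
--     count=0
--     pos=0
--     ans=-1
--     while N:
--         binary=N%2
--         N=N//2
--         pos+=1
--         if binary==1 and count!=0:
--             return -1
--         elif binary==1:
--             ans=pos
--             count=1
--     return ans
-- ===== SOURCE B (Python) =====
-- def findSetBit(N):
--     if N > 0 and N.bit_count() == 1:
--         return N.bit_length()
--     return -1
-- ===== Notes on version B (the rewrite author's own statement) =====
-- stated objective: idiomatic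
-- what changed: Replaces the digit-by-digit while loop with a closed-form test that the popcount is exactly one (bit_count) plus bit_length for the set bit's position.
import Mathlib
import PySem

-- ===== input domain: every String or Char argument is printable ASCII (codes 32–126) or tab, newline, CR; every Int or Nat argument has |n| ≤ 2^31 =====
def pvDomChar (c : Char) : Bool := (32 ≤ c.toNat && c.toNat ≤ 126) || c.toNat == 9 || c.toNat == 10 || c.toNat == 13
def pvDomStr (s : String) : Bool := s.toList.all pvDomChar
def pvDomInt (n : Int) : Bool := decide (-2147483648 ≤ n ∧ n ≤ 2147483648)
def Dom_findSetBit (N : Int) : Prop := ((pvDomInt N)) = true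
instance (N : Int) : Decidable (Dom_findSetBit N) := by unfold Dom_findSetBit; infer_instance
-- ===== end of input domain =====

-- B replaces A's digit-by-digit while loop by the closed-form popcount test
-- (bit_count == 1) plus bit_length for the 1-indexed position (objective: idiomatic).

-- ===== PORT A =====
-- the while loop of A, state = (N, count, pos, ans); the Nat argument is fuel that
-- only makes the recursion structural: findSetBit passes enough for the loop to
-- finish (proved in the lemmas below), so the fuel-0 branch is never reached
def loopA : Nat → Int → Int → Int → Int → Int
  | 0, _, _, _, ans => ans
  | fuel + 1, N, count, pos, ans =>
    if N = 0 then ans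
    else
      let binary := PySem.Int.mod N 2
      let N' := PySem.Int.floordiv N 2
      if binary = 1 ∧ count ≠ 0 then -1
      else if binary = 1 then loopA fuel N' 1 (pos + 1) (pos + 1)
      else loopA fuel N' count (pos + 1) ans

def findSetBit (N : Int) : Int := loopA (2 * N.natAbs + 2) N 0 0 (-1)

-- ===== PORT B =====
def findSetBit_alt (N : Int) : Int :=
  if 0 < N ∧ PySem.Int.bitCount N = 1 then ((PySem.Int.bitLength N : Nat) : Int)
  else -1

-- ===== PRECONDITION & SPEC =====
def Spec_findSetBit (N : Int) (out : Int) : Prop := out = findSetBit_alt N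
instance (N : Int) (out : Int) : Decidable (Spec_findSetBit N out) := by unfold Spec_findSetBit; infer_instance

-- ===== CLAIM (what is proved, stated in full; the proofs are below) =====
def Claim_equal_findSetBit : Prop := ∀ (N : Int), Dom_findSetBit N → Spec_findSetBit N (findSetBit N)

-- ===== LEMMAS AND PROOFS =====

-- once count = 1, any remaining nonzero N forces a second set bit, so the loop returns -1
theorem loopA_count_one (n : Nat) :
    ∀ (N : Int) (f : Nat) (pos ans : Int), N.natAbs = n → 2 * N.natAbs ≤ f → N ≠ 0 →
      loopA f N 1 pos ans = -1 := by
  induction n using Nat.strong_induction_on with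
  | _ n ih =>
    intro N f pos ans hn hf hN
    have e2 : PySem.Int.mod N 2 = N % 2 := PySem.Int.mod_eq_emod_of_pos (by norm_num)
    have ed : PySem.Int.floordiv N 2 = N / 2 := PySem.Int.floordiv_eq_ediv_of_pos (by norm_num)
    obtain ⟨f', rfl⟩ : ∃ f', f = f' + 1 := ⟨f - 1, by omega⟩
    simp only [loopA, hN, if_false, e2, ed]
    rcases Int.emod_two_eq_zero_or_one N with hm | hm
    · have hfd : N / 2 ≠ 0 := by omega
      have hlt : (N / 2).natAbs < n := by omega
      simp only [hm]
      norm_num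
      exact ih _ hlt _ f' (pos + 1) ans rfl (by omega) hfd
    · simp [hm]

-- a positive integer has at least one set bit
theorem pvBitCount_pos (n : Nat) :
    ∀ N : Int, N.natAbs = n → 0 < N → 1 ≤ PySem.Int.bitCount N := by
  induction n using Nat.strong_induction_on with
  | _ n ih =>
    intro N hn hN
    have e2 : PySem.Int.mod N 2 = N % 2 := PySem.Int.mod_eq_emod_of_pos (by norm_num)
    have ed : PySem.Int.floordiv N 2 = N / 2 := PySem.Int.floordiv_eq_ediv_of_pos (by norm_num)
    rw [PySem.Int.bitCount_of_pos hN, e2, ed]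
    rcases Int.emod_two_eq_zero_or_one N with hm | hm
    · have hfdpos : 0 < N / 2 := by omega
      have hlt : (N / 2).natAbs < n := by omega
      have := ih _ hlt _ rfl hfdpos
      omega
    · simp [hm]

-- main loop invariant on positive N, count = 0
theorem loopA_pos (n : Nat) :
    ∀ (N : Int) (f : Nat) (pos ans : Int), N.natAbs = n → 2 * N.natAbs + 2 ≤ f → 0 < N →
      loopA f N 0 pos ans =
        if PySem.Int.bitCount N = 1 then pos + ((PySem.Int.bitLength N : Nat) : Int)
        else -1 := by
  induction n using Nat.strong_induction_on with
  | _ n ih =>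
    intro N f pos ans hn hf hN
    have hN0 : N ≠ 0 := by omega
    have e2 : PySem.Int.mod N 2 = N % 2 := PySem.Int.mod_eq_emod_of_pos (by norm_num)
    have ed : PySem.Int.floordiv N 2 = N / 2 := PySem.Int.floordiv_eq_ediv_of_pos (by norm_num)
    have hbc : PySem.Int.bitCount N = (N % 2).toNat + PySem.Int.bitCount (N / 2) := by
      rw [PySem.Int.bitCount_of_pos hN, e2, ed]
    have hbl : PySem.Int.bitLength N = PySem.Int.bitLength (N / 2) + 1 := by
      rw [PySem.Int.bitLength_of_pos hN, ed]
    obtain ⟨f', rfl⟩ : ∃ f', f = f' + 1 := ⟨f - 1, by omega⟩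
    simp only [loopA, hN0, if_false, e2, ed]
    rcases Int.emod_two_eq_zero_or_one N with hm | hm
    · -- even: recurse with same count
      have hfdpos : 0 < N / 2 := by omega
      have hlt : (N / 2).natAbs < n := by omega
      simp only [hm]
      norm_num
      rw [ih _ hlt _ f' (pos + 1) ans rfl (by omega) hfdpos, hbc, hbl, hm]
      norm_num
      split <;> omega
    · -- odd: set ans, count := 1
      by_cases h1 : N = 1
      · subst h1
        norm_num
        obtain ⟨f'', rfl⟩ : ∃ f'', f' = f'' + 1 := ⟨f' - 1, by omega⟩
        simp only [loopA]
        have c1 : PySem.Int.bitCount 1 = 1 := by decide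
        have l1 : PySem.Int.bitLength 1 = 1 := by decide
        simp [c1, l1]
      · have hfdpos : 0 < N / 2 := by omega
        have hbc2 := pvBitCount_pos _ (N / 2) rfl hfdpos
        have hrec := loopA_count_one _ (N / 2) f' (pos + 1) (pos + 1) rfl (by omega) (by omega)
        simp only [hm]
        norm_num
        rw [hrec, hbc, hm]
        have hne : ¬(((1 : Int)).toNat + PySem.Int.bitCount (N / 2) = 1) := by omega
        simp only [hne, if_false]

-- the loop on negative N always returns -1
theorem loopA_neg (n : Nat) :
    ∀ (N : Int) (f : Nat) (pos ans : Int), N.natAbs = n → 2 * N.natAbs + 2 ≤ f → N < 0 →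
      loopA f N 0 pos ans = -1 := by
  induction n using Nat.strong_induction_on with
  | _ n ih =>
    intro N f pos ans hn hf hN
    have hN0 : N ≠ 0 := by omega
    have e2 : PySem.Int.mod N 2 = N % 2 := PySem.Int.mod_eq_emod_of_pos (by norm_num)
    have ed : PySem.Int.floordiv N 2 = N / 2 := PySem.Int.floordiv_eq_ediv_of_pos (by norm_num)
    obtain ⟨f', rfl⟩ : ∃ f', f = f' + 1 := ⟨f - 1, by omega⟩
    simp only [loopA, hN0, if_false, e2, ed]
    rcases Int.emod_two_eq_zero_or_one N with hm | hm
    · have hfdneg : N / 2 < 0 := by omega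
      have hlt : (N / 2).natAbs < n := by omega
      simp only [hm]
      norm_num
      exact ih _ hlt _ f' (pos + 1) ans rfl (by omega) (by omega)
    · have hfdneg : N / 2 < 0 := by omega
      simp only [hm]
      norm_num
      exact loopA_count_one _ (N / 2) f' (pos + 1) (pos + 1) rfl (by omega) (by omega)

-- ===== VERDICT (by name: the statement is the Claim_ definition above) =====
theorem findSetBit_spec : Claim_equal_findSetBit := by
  intro N _
  unfold Spec_findSetBit findSetBit findSetBit_alt
  rcases lt_trichotomy N 0 with h | h | h
  · rw [loopA_neg _ N _ 0 (-1) rfl (by omega) h]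
    have : ¬ (0 < N ∧ PySem.Int.bitCount N = 1) := by omega
    simp [this]
  · subst h
    simp [loopA]
  · rw [loopA_pos _ N _ 0 (-1) rfl (by omega) h]
    split <;> rename_i hc
    · simp [h, hc]
    · have : ¬ (0 < N ∧ PySem.Int.bitCount N = 1) := by tauto
      simp [this]
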